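-- pv_equiv track=rewrite | github.com/sugenius77/Baeckjoon-Algorithm | 프로그래머스/unrated/138476. 귤 고르기/귤 고르기.py | solution
-- ===== SOURCE A (Python) =====
-- from collections import Counter
--
-- def solution(k, tangerine):
--     answer = 0
--     type = 0
--     count = Counter(tangerine)
--     new_list = sorted(list(count.items()), key = lambda x:x[1], reverse = True)
--
--     for i in new_list:
--         k -= i[1]
--         if k == 0:
--             type += 1
--             break
--         if k < 0:
--             type += 1
--             break
--         else:
--             type += 1
--     return type
-- ===== SOURCE B (Python) =====
-- from collections import Counter
-- from itertools import accumulate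
-- from bisect import bisect_left
--
-- def solution(k, tangerine):
--     prefix = list(accumulate(sorted(Counter(tangerine).values(), reverse=True)))
--     return min(bisect_left(prefix, k) + 1, len(prefix))
-- ===== Notes on version B (the rewrite author's own statement) =====
-- stated objective: alternative
-- what changed: Replaces the subtract-and-break greedy loop over sorted (value,count) items by a prefix-sum table of the descending counts plus a binary search (bisect_left) for the first prefix reaching k, capped at the number of distinct types.
import Mathlib
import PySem

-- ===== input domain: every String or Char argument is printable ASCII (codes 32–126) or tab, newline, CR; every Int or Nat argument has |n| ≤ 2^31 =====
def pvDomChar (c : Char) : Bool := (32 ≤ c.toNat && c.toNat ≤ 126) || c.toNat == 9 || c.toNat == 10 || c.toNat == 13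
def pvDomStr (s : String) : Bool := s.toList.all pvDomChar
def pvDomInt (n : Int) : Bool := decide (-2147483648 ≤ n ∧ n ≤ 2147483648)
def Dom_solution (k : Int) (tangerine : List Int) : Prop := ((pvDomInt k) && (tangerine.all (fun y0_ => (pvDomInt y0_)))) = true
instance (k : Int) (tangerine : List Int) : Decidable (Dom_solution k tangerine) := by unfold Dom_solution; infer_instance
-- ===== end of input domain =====

-- B replaces A's subtract-and-break greedy loop by a prefix-sum table of the descending
-- counts plus a bisect_left binary search (objective: alternative decomposition, same cost).

-- ===== PORT A =====
-- the for-loop over new_list carrying (k, type) with its break conditions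
def solutionLoopA : List (Int × Int) → Int → Int → Int
  | [], _, ty => ty
  | i :: rest, k, ty =>
    let k' := k - i.2
    if k' = 0 then ty + 1
    else if k' < 0 then ty + 1
    else solutionLoopA rest k' (ty + 1)

def solution (k : Int) (tangerine : List Int) : Int :=
  let count := PySem.Dict.counter tangerine
  let newList := PySem.List.sorted count.items (fun x => x.2) true
  solutionLoopA newList k 0

-- ===== PORT B =====
-- itertools.accumulate (running sums)
def pyAccumulate : List Int → Int → List Int
  | [], _ => []
  | v :: rest, acc => (acc + v) :: pyAccumulate rest (acc + v)

def solution_alt (k : Int) (tangerine : List Int) : Int :=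
  let counts := PySem.List.sorted (PySem.Dict.counter tangerine).values (fun v => v) true
  let pref := pyAccumulate counts 0
  min ((PySem.List.bisectLeft pref k : Int) + 1) (pref.length : Int)

-- ===== PRECONDITION & SPEC =====
def Spec_solution (k : Int) (tangerine : List Int) (out : Int) : Prop := out = solution_alt k tangerine
instance (k : Int) (tangerine : List Int) (out : Int) : Decidable (Spec_solution k tangerine out) := by unfold Spec_solution; infer_instance

-- ===== CLAIM (what is proved, stated in full; the proofs are below) =====
def Claim_equal_solution : Prop := ∀ (k : Int) (tangerine : List Int), Dom_solution k tangerine → Spec_solution k tangerine (solution k tangerine)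

-- ===== LEMMAS AND PROOFS =====

-- A's loop only consumes the second components of the items
def loopV : List Int → Int → Int → Int
  | [], _, ty => ty
  | v :: rest, k, ty =>
    let k' := k - v
    if k' = 0 then ty + 1
    else if k' < 0 then ty + 1
    else loopV rest k' (ty + 1)

theorem loopA_eq_loopV (l : List (Int × Int)) (k ty : Int) :
    solutionLoopA l k ty = loopV (l.map (·.2)) k ty := by
  induction l generalizing k ty with
  | nil => rfl
  | cons i rest ih => simp [solutionLoopA, loopV, ih]

theorem loopV_shift (l : List Int) (k ty : Int) :
    loopV l k ty = ty + loopV l k 0 := by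
  induction l generalizing k ty with
  | nil => simp [loopV]
  | cons v rest ih =>
    simp only [loopV]
    split_ifs with h1 h2
    · ring
    · ring
    · rw [ih (k - v) (ty + 1), ih (k - v) (0 + 1)]; ring

theorem pyAccumulate_shift (l : List Int) (a : Int) :
    pyAccumulate l a = (pyAccumulate l 0).map (· + a) := by
  induction l generalizing a with
  | nil => rfl
  | cons v rest ih =>
    simp only [pyAccumulate]
    rw [ih (a + v), ih (0 + v), List.map_cons, List.map_map]
    congr 1
    · ring
    · congr 1
      funext x
      simp only [Function.comp_apply]
      ring

theorem pyAccumulate_length (l : List Int) (a : Int) :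
    (pyAccumulate l a).length = l.length := by
  induction l generalizing a with
  | nil => rfl
  | cons v rest ih => simp [pyAccumulate, ih]

theorem pyAccumulate_pos (l : List Int) (a : Int) (hl : ∀ v ∈ l, 1 ≤ v) :
    ∀ p ∈ pyAccumulate l a, a + 1 ≤ p := by
  induction l generalizing a with
  | nil => simp [pyAccumulate]
  | cons v rest ih =>
    intro p hp
    simp only [pyAccumulate, List.mem_cons] at hp
    rcases hp with rfl | hp
    · have := hl v (by simp); omega
    · have := ih (a + v) (fun w hw => hl w (by simp [hw])) p hp
      have := hl v (by simp); omega

theorem pyAccumulate_pairwise (l : List Int) (a : Int) (hl : ∀ v ∈ l, 1 ≤ v) :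
    (pyAccumulate l a).Pairwise (· ≤ ·) := by
  induction l generalizing a with
  | nil => simp [pyAccumulate]
  | cons v rest ih =>
    simp only [pyAccumulate]
    refine List.pairwise_cons.2 ⟨?_, ih (a + v) (fun w hw => hl w (by simp [hw]))⟩
    intro p hp
    have := pyAccumulate_pos rest (a + v) (fun w hw => hl w (by simp [hw])) p hp
    omega

-- bisect_left on a sorted list counts the elements < x
theorem bisectLeft_eq_countP (l : List Int) (x : Int) (hs : l.Pairwise (· ≤ ·)) :
    PySem.List.bisectLeft l x = l.countP (fun p => decide (p < x)) := by
  obtain ⟨hb, hlt, hge⟩ := PySem.List.bisectLeft_spec l x hs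
  set b := PySem.List.bisectLeft l x with hbdef
  have hsplit : l = l.take b ++ l.drop b := (List.take_append_drop b l).symm
  have h1 : (l.take b).countP (fun p => decide (p < x)) = (l.take b).length := by
    apply List.countP_eq_length.2
    intro p hp
    obtain ⟨j, hj, rfl⟩ := List.mem_iff_getElem.1 hp
    rw [List.getElem_take]
    have hjb : j < b := lt_of_lt_of_le hj (by simp)
    exact decide_eq_true (hlt j (by omega) hjb)
  have h2 : (l.drop b).countP (fun p => decide (p < x)) = 0 := by
    apply List.countP_eq_zero.2
    intro p hp
    obtain ⟨j, hj, rfl⟩ := List.mem_iff_getElem.1 hp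
    have hjl : b + j < l.length := by
      rw [List.length_drop] at hj; omega
    rw [List.getElem_drop]
    simp only [decide_eq_true_eq, not_lt]
    exact hge (b + j) hjl (by omega)
  calc b = (l.take b).length := by rw [List.length_take]; omega
    _ = l.countP (fun p => decide (p < x)) := by
        conv_rhs => rw [hsplit]
        rw [List.countP_append, h1, h2]
        omega

-- characterisation of A's loop as B's count-of-prefixes formula
theorem loopV_eq_min (vs : List Int) (k : Int) (hpos : ∀ v ∈ vs, 1 ≤ v) :
    loopV vs k 0 =
      min (((pyAccumulate vs 0).countP (fun p => decide (p < k)) : Int) + 1)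
          (vs.length : Int) := by
  induction vs generalizing k with
  | nil => simp [loopV, pyAccumulate]
  | cons v rest ih =>
    have hv : 1 ≤ v := hpos v (by simp)
    have hrest : ∀ w ∈ rest, 1 ≤ w := fun w hw => hpos w (by simp [hw])
    simp only [loopV, pyAccumulate, zero_add]
    rw [pyAccumulate_shift rest v, List.countP_cons, List.countP_map]
    by_cases hstop : k - v ≤ 0
    · -- loop stops after the first element with result 1
      have hc : (pyAccumulate rest 0).countP ((fun p => decide (p < k)) ∘ (· + v)) = 0 := by
        apply List.countP_eq_zero.2
        intro p hp
        have := pyAccumulate_pos rest 0 hrest p hp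
        simp; omega
      rw [hc]
      have hvk : decide (v < k) = false := by simp; omega
      rw [hvk]
      simp only [Bool.false_eq_true, if_false, Nat.cast_zero, zero_add,
        List.length_cons]
      split_ifs with h1 h2
      · push_cast; omega
      · push_cast; omega
      · omega
    · -- loop continues: peel one element
      have h1 : ¬ (k - v = 0) := by omega
      have h2 : ¬ (k - v < 0) := by omega
      rw [if_neg h1, if_neg h2, loopV_shift rest (k - v) 1, ih (k - v) hrest]
      have hc : (pyAccumulate rest 0).countP ((fun p => decide (p < k)) ∘ (· + v)) =
          (pyAccumulate rest 0).countP (fun p => decide (p < k - v)) := by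
        apply List.countP_congr
        intro p _
        simp; omega
      rw [hc]
      have hvk : v < k := by omega
      simp only [hvk, decide_true, List.length_cons]
      push_cast
      omega

-- the two descending-sorted count sequences coincide
theorem sorted_items_map_eq (tangerine : List Int) :
    (PySem.List.sorted (PySem.Dict.counter tangerine).items (fun x => x.2) true).map (·.2) =
      PySem.List.sorted (PySem.Dict.counter tangerine).values (fun v => v) true := by
  apply List.Perm.eq_of_pairwise (le := fun a b : Int => b ≤ a)
  · intro a b _ _ h1 h2; omega
  · exact List.pairwise_map.2 (PySem.List.sorted_pairwise_rev _ _)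
  · exact PySem.List.sorted_pairwise_rev _ (fun v => v)
  · -- both are permutations of counter.values
    have h1 : (PySem.List.sorted (PySem.Dict.counter tangerine).items (fun x => x.2) true).Perm
        (PySem.Dict.counter tangerine).items := PySem.List.sorted_perm _ _ _
    have h2 : (PySem.List.sorted (PySem.Dict.counter tangerine).values (fun v => v) true).Perm
        (PySem.Dict.counter tangerine).values := PySem.List.sorted_perm _ _ _
    refine (h1.map (·.2)).trans (List.Perm.trans ?_ h2.symm)
    simp [PySem.Dict.values]

-- every count of Counter(xs) is at least 1
theorem counter_values_pos (tangerine : List Int) :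
    ∀ v ∈ (PySem.Dict.counter tangerine).values, 1 ≤ v := by
  intro v hv
  have : (PySem.Dict.counter tangerine).values =
      (PySem.Set.ofList tangerine).map (fun k => (tangerine.count k : Int)) := by
    simp [PySem.Dict.values, PySem.Dict.items_counter, List.map_map]
  rw [this] at hv
  obtain ⟨x, hx, rfl⟩ := List.mem_map.1 hv
  have hxmem : x ∈ tangerine := (PySem.Set.mem_ofList tangerine x).1 hx
  have : 0 < tangerine.count x := List.count_pos_iff.2 hxmem
  omega

-- ===== VERDICT (by name: the statement is the Claim_ definition above) =====
theorem solution_spec : Claim_equal_solution := by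
  intro k tangerine _
  show solutionLoopA (PySem.List.sorted (PySem.Dict.counter tangerine).items (fun x => x.2) true) k 0
      = min ((PySem.List.bisectLeft (pyAccumulate (PySem.List.sorted (PySem.Dict.counter tangerine).values (fun v => v) true) 0) k : Int) + 1)
            ((pyAccumulate (PySem.List.sorted (PySem.Dict.counter tangerine).values (fun v => v) true) 0).length : Int)
  have hpos : ∀ v ∈ PySem.List.sorted (PySem.Dict.counter tangerine).values (fun v => v) true, 1 ≤ v := by
    intro v hv
    exact counter_values_pos tangerine v ((PySem.List.mem_sorted _ _ _ _).1 hv)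
  rw [loopA_eq_loopV, sorted_items_map_eq, loopV_eq_min _ _ hpos,
    bisectLeft_eq_countP _ _ (pyAccumulate_pairwise _ _ hpos), pyAccumulate_length]
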